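-- pv_equiv track=rewrite | github.com/cameel/nastro | opera_importer.py | line_strip
-- ===== SOURCE A (Python) =====
-- def line_strip(text):
--     """Strips leading empty lines and all trailing whitespace from the text"""
--     try:
--         first_nonwhitespace_index = next(i for i, character in enumerate(text) if not character.isspace())
--     except StopIteration:
--         return ''
--
--     last_nonwhitespace_index = len(text) - 1 - next(i for i, character in enumerate(reversed(text)) if not character.isspace())
--     assert last_nonwhitespace_index >= first_nonwhitespace_index
--
--     try:
--         first_nonwhitespace_line_start = first_nonwhitespace_index - next(i for i, character in enumerate(reversed(text[:first_nonwhitespace_index])) if character == '\n')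
--     except StopIteration:
--         first_nonwhitespace_line_start = 0
--
--     return text[first_nonwhitespace_line_start:last_nonwhitespace_index + 1]
-- ===== SOURCE B (Python) =====
-- def line_strip(text):
--     """Strips leading empty lines and all trailing whitespace from the text"""
--     stripped = text.rstrip()
--     if not stripped:
--         return ''
--     lines = stripped.split('\n')
--     while lines and lines[0].strip() == '':
--         lines.pop(0)
--     return '\n'.join(lines)
-- ===== Notes on version B (the rewrite author's own statement) =====
-- stated objective: idiomatic
-- what changed: Replaces A's three generator scans and index arithmetic (first non-whitespace, last non-whitespace from the end, last newline before the first non-whitespace) with an idiomatic rstrip, split into lines, drop leading all-whitespace lines, and rejoin.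
import Mathlib
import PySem

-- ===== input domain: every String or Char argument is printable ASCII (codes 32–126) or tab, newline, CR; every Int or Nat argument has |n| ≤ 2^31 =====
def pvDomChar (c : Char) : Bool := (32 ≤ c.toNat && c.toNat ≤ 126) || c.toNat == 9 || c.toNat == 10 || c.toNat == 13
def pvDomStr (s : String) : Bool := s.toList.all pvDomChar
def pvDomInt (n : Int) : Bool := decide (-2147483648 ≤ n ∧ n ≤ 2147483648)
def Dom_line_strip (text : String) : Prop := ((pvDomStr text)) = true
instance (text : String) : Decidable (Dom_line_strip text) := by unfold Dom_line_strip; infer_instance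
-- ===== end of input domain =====

-- B replaces A's three generator scans and index arithmetic with the idiomatic
-- rstrip / split into lines / drop leading blank lines / rejoin (objective: idiomatic).

-- ===== PORT A =====
-- Python A: index of the first non-whitespace char (StopIteration -> ''), index of the
-- last one via the reversed text, then the start of the line holding the first
-- non-whitespace char via the reversed prefix, and one slice.
def line_strip (text : String) : String :=
  let l := text.toList
  match l.findIdx? (fun c => !PySem.Chars.isspace c) with
  | none => ""            -- the StopIteration branch: all-whitespace (or empty) text
  | some f =>
    -- next(...) over reversed(text) cannot raise here (a non-whitespace char exists)
    let lastIdx : Nat := l.length - 1 - l.reverse.findIdx (fun c => !PySem.Chars.isspace c)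
    let start : Nat :=
      match (l.take f).reverse.findIdx? (fun c => c == '\n') with
      | none => 0
      | some j => f - j
    String.mk (PySem.List.slice l (some (start : Int)) (some ((lastIdx + 1 : Nat) : Int)))

-- ===== PORT B =====
-- Python B: stripped = text.rstrip(); if empty return ''; split on '\n',
-- pop leading all-whitespace lines, '\n'.join the rest.
def line_strip_alt (text : String) : String :=
  let stripped := PySem.Chars.rstrip text.toList
  if stripped = [] then ""
  else
    let lines := PySem.Chars.splitOn stripped ['\n']
    let lines := lines.dropWhile (fun ln => PySem.Chars.strip ln == [])
    String.mk (PySem.Chars.join ['\n'] lines)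

-- ===== PRECONDITION & SPEC =====
def Spec_line_strip (text : String) (out : String) : Prop := out = line_strip_alt text
instance (text : String) (out : String) : Decidable (Spec_line_strip text out) := by unfold Spec_line_strip; infer_instance

-- ===== CLAIM (what is proved, stated in full; the proofs are below) =====
def Claim_equal_line_strip : Prop := ∀ (text : String), Dom_line_strip text → Spec_line_strip text (line_strip text)

-- ===== LEMMAS AND PROOFS =====

def pvSpl : List Char → List Char → List (List Char)
  | cur, [] => [cur.reverse]
  | cur, c :: rest => if c = '\n' then cur.reverse :: pvSpl [] rest else pvSpl (c :: cur) rest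

theorem pvSpl_ne_nil (cur l : List Char) : pvSpl cur l ≠ [] := by
  induction l generalizing cur with
  | nil => simp [pvSpl]
  | cons c rest ih => by_cases h : c = '\n' <;> simp [pvSpl, h, ih]

theorem pvGo_spec (fuel : Nat) (l cur : List Char) (acc : List (List Char))
    (h : l.length ≤ fuel) :
    PySem.Chars.splitOn.go ['\n'] fuel l cur acc = acc.reverse ++ pvSpl cur l := by
  induction fuel generalizing l cur acc with
  | zero =>
    have : l = [] := by cases l <;> simp_all
    subst this
    simp [PySem.Chars.splitOn.go, pvSpl]
  | succ fuel ih =>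
    cases l with
    | nil => simp [PySem.Chars.splitOn.go, pvSpl]
    | cons c rest =>
      rw [PySem.Chars.splitOn.go.eq_def]
      by_cases hc : c = '\n'
      · subst hc
        simp only [List.isPrefixOf, Bool.and_true, beq_self_eq_true, if_pos]
        rw [ih _ _ _ (by simpa using Nat.le_of_succ_le_succ h)]
        simp [pvSpl]
      · have : List.isPrefixOf ['\n'] (c :: rest) = false := by
          simp [List.isPrefixOf]; exact fun h' => absurd h'.symm hc
        simp only [this, Bool.false_eq_true, if_neg, not_false_eq_true]
        rw [ih _ _ _ (by simpa using Nat.le_of_succ_le_succ h)]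
        simp [pvSpl, hc]

theorem pvSplitOn_eq (s : List Char) : PySem.Chars.splitOn s ['\n'] = pvSpl [] s := by
  rw [PySem.Chars.splitOn, pvGo_spec _ _ _ _ (by omega)]
  simp

theorem pvIntercalate_cons₂ (a b : List Char) (L : List (List Char)) :
    List.intercalate ['\n'] (a :: b :: L) = a ++ '\n' :: List.intercalate ['\n'] (b :: L) := by
  simp [List.intercalate, List.intersperse]

theorem pvJoin_spl (l cur : List Char) :
    List.intercalate ['\n'] (pvSpl cur l) = cur.reverse ++ l := by
  induction l generalizing cur with
  | nil => simp [pvSpl, List.intercalate]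
  | cons c rest ih =>
    by_cases h : c = '\n'
    · subst h
      obtain ⟨b, L, hb⟩ : ∃ b L, pvSpl [] rest = b :: L := by
        cases hbl : pvSpl [] rest with
        | nil => exact absurd hbl (pvSpl_ne_nil [] rest)
        | cons b L => exact ⟨b, L, rfl⟩
      have hih := ih []
      rw [hb] at hih
      simp only [pvSpl, hb, if_true]
      rw [pvIntercalate_cons₂, hih]
      simp
    · simp [pvSpl, h, ih]

theorem pvSpl_structure (l cur : List Char) :
    pvSpl cur l = (cur.reverse ++ l.takeWhile (fun c => c != '\n')) ::
      (if '\n' ∈ l then pvSpl [] (l.drop ((l.takeWhile (fun c => c != '\n')).length + 1)) else []) := by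
  induction l generalizing cur with
  | nil => simp [pvSpl]
  | cons c rest ih =>
    by_cases h : c = '\n'
    · subst h
      simp [pvSpl, List.takeWhile_cons]
    · rw [show pvSpl cur (c :: rest) = pvSpl (c :: cur) rest by simp [pvSpl, h], ih]
      simp only [List.takeWhile_cons, if_pos (by simp [h] : (c != '\n') = true)]
      simp [List.reverse_cons, List.mem_cons, show ¬'\n' = c from fun e => h e.symm]

theorem pvDropWhile_eq_drop (p : Char → Bool) (l : List Char) :
    l.dropWhile p = l.drop (l.takeWhile p).length := by
  induction l with
  | nil => rfl
  | cons c t ih => by_cases h : p c <;> simp [List.dropWhile_cons, List.takeWhile_cons, h, ih]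

theorem pvFindIdx_eq_length_takeWhile (p : Char → Bool) (l : List Char) :
    l.findIdx p = (l.takeWhile (fun c => !p c)).length := by
  induction l with
  | nil => rfl
  | cons c t ih => by_cases h : p c <;> simp [List.findIdx_cons, List.takeWhile_cons, h, ih]

theorem pvRstrip_eq_nil_iff (x : List Char) :
    PySem.Chars.rstrip x = [] ↔ ∀ c ∈ x, PySem.Chars.isspace c = true := by
  simp [PySem.Chars.rstrip, List.dropWhile_eq_nil_iff]

theorem pvStrip_eq_nil_iff (x : List Char) :
    (PySem.Chars.strip x == []) = true ↔ ∀ c ∈ x, PySem.Chars.isspace c = true := by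
  rw [beq_iff_eq, PySem.Chars.strip, PySem.Chars.lstrip, pvRstrip_eq_nil_iff]
  constructor
  · intro h c hc
    have hx : c ∈ List.takeWhile PySem.Chars.isspace x ++ List.dropWhile PySem.Chars.isspace x := by
      rw [List.takeWhile_append_dropWhile]; exact hc
    rcases List.mem_append.mp hx with h1 | h1
    · exact List.mem_takeWhile_imp h1
    · exact h c h1
  · intro h c hc
    exact h c ((List.dropWhile_sublist _).mem hc)

def pvStartOf (r : List Char) : Nat :=
  match (r.take (r.findIdx (fun c => !PySem.Chars.isspace c))).reverse.findIdx? (fun c => c == '\n') with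
  | none => 0
  | some j => r.findIdx (fun c => !PySem.Chars.isspace c) - j

theorem pvTakeWhile_eq_take (p : Char → Bool) (l : List Char) :
    l.takeWhile p = l.take (l.takeWhile p).length :=
  List.prefix_iff_eq_take.mp (List.takeWhile_prefix p)

theorem pvFindIdxNot_eq (r : List Char) :
    r.findIdx (fun c => !PySem.Chars.isspace c) = (r.takeWhile PySem.Chars.isspace).length := by
  rw [pvFindIdx_eq_length_takeWhile]
  simp

theorem pvStartOf_shift (h t : List Char) (hws : ∀ c ∈ h, PySem.Chars.isspace c = true) :
    pvStartOf (h ++ '\n' :: t) = h.length + 1 + pvStartOf t := by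
  have hnl : PySem.Chars.isspace '\n' = true := by decide
  have htw : (h ++ '\n' :: t).takeWhile PySem.Chars.isspace
      = h ++ '\n' :: t.takeWhile PySem.Chars.isspace := by
    rw [List.takeWhile_append_of_pos hws, List.takeWhile_cons, if_pos hnl]
  have hf : (h ++ '\n' :: t).findIdx (fun c => !PySem.Chars.isspace c)
      = h.length + 1 + t.findIdx (fun c => !PySem.Chars.isspace c) := by
    rw [pvFindIdxNot_eq, pvFindIdxNot_eq, htw]
    simp [Nat.add_comm, Nat.add_assoc, Nat.add_left_comm]
  have hP : (h ++ '\n' :: t).take ((h ++ '\n' :: t).findIdx (fun c => !PySem.Chars.isspace c))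
      = h ++ '\n' :: t.take (t.findIdx (fun c => !PySem.Chars.isspace c)) := by
    rw [hf, pvFindIdxNot_eq, ← pvTakeWhile_eq_take] at *
    rw [show (h ++ '\n' :: t).take (h.length + 1 + (t.takeWhile PySem.Chars.isspace).length)
        = (h ++ '\n' :: t).take ((h ++ '\n' :: t).takeWhile PySem.Chars.isspace).length by
      rw [htw]; simp [Nat.add_comm, Nat.add_assoc, Nat.add_left_comm]]
    rw [← pvTakeWhile_eq_take, htw]
  unfold pvStartOf
  rw [hP, hf]
  set F := t.findIdx fun c => !PySem.Chars.isspace c with hF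
  have hrev : (h ++ '\n' :: t.take F).reverse = (t.take F).reverse ++ '\n' :: h.reverse := by
    simp
  rw [hrev, List.findIdx?_append]
  have hlenP : (t.take F).reverse.length = F := by
    have : F ≤ t.length := by
      rw [hF, pvFindIdxNot_eq]
      exact (List.takeWhile_prefix _).length_le
    simp [this]
  cases hPj : (t.take F).reverse.findIdx? (fun c => c == '\n') with
  | none =>
    simp only [Option.none_or]
    rw [show ('\n' :: h.reverse).findIdx? (fun c => c == '\n') = some 0 by simp [List.findIdx?_cons]]
    simp only [Option.map_some]
    simp [hlenP]
  | some j =>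
    have hjlt : j < F := by
      have := List.findIdx?_eq_some_iff_getElem.mp hPj
      obtain ⟨hlt, -⟩ := this
      omega
    simp only [Option.some_or]
    omega

theorem pvCrux (n : Nat) (r : List Char) (hn : r.length ≤ n)
    (hex : ∃ c ∈ r, PySem.Chars.isspace c = false) :
    List.intercalate ['\n'] ((pvSpl [] r).dropWhile (fun ln => PySem.Chars.strip ln == [])) =
      r.drop (pvStartOf r) := by
  induction n generalizing r with
  | zero =>
    have : r = [] := List.eq_nil_of_length_eq_zero (by omega)
    subst this
    simp at hex
  | succ n ih =>
    by_cases hball : ∀ c ∈ r.takeWhile (fun c => c != '\n'), PySem.Chars.isspace c = true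
    · -- the first line of r is all whitespace
      by_cases hmem : '\n' ∈ r
      · -- r = h ++ '\n' :: t ; recurse on t
        set h := r.takeWhile (fun c => c != '\n') with hh
        set t := r.drop (h.length + 1) with ht
        have hdw : r.dropWhile (fun c => c != '\n') = r.drop h.length := by
          rw [pvDropWhile_eq_drop]
        have hne : r.dropWhile (fun c => c != '\n') ≠ [] := by
          intro hnil
          have : r = h := by
            conv_lhs => rw [← List.takeWhile_append_dropWhile (p := fun c => c != '\n') (l := r)]
            rw [hnil]; simp [← hh]
          rw [this] at hmem
          have := List.mem_takeWhile_imp (hh ▸ hmem)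
          simp at this
        obtain ⟨c0, t0, hct⟩ : ∃ c0 t0, r.dropWhile (fun c => c != '\n') = c0 :: t0 := by
          cases hx : r.dropWhile (fun c => c != '\n') with
          | nil => exact absurd hx hne
          | cons a b => exact ⟨a, b, rfl⟩
        have hc0 : c0 = '\n' := by
          have := List.head_dropWhile_not (fun c => c != '\n') (l := r) (by simp [hct])
          simp [hct] at this
          exact this
        have hrdec : r = h ++ '\n' :: t := by
          conv_lhs => rw [← List.takeWhile_append_dropWhile (p := fun c => c != '\n') (l := r)]
          rw [hct, hc0, ← hh]
          congr 1
          have : t0 = (r.drop h.length).drop 1 := by rw [← hdw, hct, hc0]; rfl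
          rw [this, List.drop_drop, ht]
        have hext : ∃ c ∈ t, PySem.Chars.isspace c = false := by
          obtain ⟨c, hc, hcw⟩ := hex
          rw [hrdec] at hc
          rcases List.mem_append.mp hc with h1 | h1
          · exact absurd (hball c (hh ▸ h1)) (by simp [hcw])
          · rcases List.mem_cons.mp h1 with h2 | h2
            · subst h2; exact absurd (by decide : PySem.Chars.isspace '\n' = true) (by simp [hcw])
            · exact ⟨c, h2, hcw⟩
        have hlen : t.length ≤ n := by
          have := congrArg List.length hrdec
          simp at this
          omega
        have hblank : ((fun ln => PySem.Chars.strip ln == []) h) = true := by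
          exact (pvStrip_eq_nil_iff h).mpr hball
        rw [pvSpl_structure r [], if_pos hmem]
        rw [List.dropWhile_cons_of_pos (by simpa using hblank)]
        rw [← hh, ← ht, ih t hlen hext]
        rw [show pvStartOf r = h.length + 1 + pvStartOf t by
          rw [hrdec, pvStartOf_shift h t (fun c hc => hball c (hh ▸ hc))]]
        conv_rhs => rw [hrdec]
        rw [show h.length + 1 + pvStartOf t = h.length + (1 + pvStartOf t) by omega]
        rw [List.drop_length_add_append]
        rw [show (1 + pvStartOf t) = pvStartOf t + 1 by omega, List.drop_succ_cons]
      · -- no newline at all: whole r is one all-whitespace line, contradicting hex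
        have : r.takeWhile (fun c => c != '\n') = r :=
          List.takeWhile_eq_self_iff.mpr (fun c hc => by
            simp
            intro hceq
            exact hmem (hceq ▸ hc))
        rw [this] at hball
        obtain ⟨c, hc, hcw⟩ := hex
        exact absurd (hball c hc) (by simp [hcw])
    · -- first line contains a non-whitespace char: nothing is dropped
      push_neg at hball
      obtain ⟨c, hch, hcw⟩ := hball
      have hblankF : ¬ ((PySem.Chars.strip (r.takeWhile (fun c => c != '\n')) == []) = true) := by
        rw [pvStrip_eq_nil_iff]
        push_neg
        exact ⟨c, hch, hcw⟩
      conv_lhs => rw [pvSpl_structure r []]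
      rw [List.dropWhile_cons_of_neg (by simpa using hblankF)]
      rw [← pvSpl_structure r [], pvJoin_spl]
      -- pvStartOf r = 0
      have hzero : pvStartOf r = 0 := by
        have hq : ∀ x ∈ r.takeWhile (fun c => c != '\n'), (x == '\n') = false := by
          intro x hx
          have := List.mem_takeWhile_imp hx
          simpa using this
        set hl := (r.takeWhile (fun c => c != '\n')).length with hhl
        have h1 : r.takeWhile (fun c => c != '\n') = r.take hl := pvTakeWhile_eq_take _ r
        set F := r.findIdx (fun c => !PySem.Chars.isspace c) with hFdef
        have hFtw : F = (r.takeWhile PySem.Chars.isspace).length := pvFindIdxNot_eq r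
        have h2 : r.takeWhile PySem.Chars.isspace = r.take F := by
          rw [hFtw]; exact pvTakeWhile_eq_take _ r
        have hFh : F ≤ hl := by
          by_contra hlt
          push_neg at hlt
          have h4 : r.take hl = (r.take F).take hl := by
            rw [List.take_take, Nat.min_eq_left (Nat.le_of_lt hlt)]
          have hcmem : c ∈ r.takeWhile PySem.Chars.isspace := by
            rw [← h2, ← h1] at h4
            exact List.mem_of_mem_take (h4 ▸ hch)
          exact absurd (List.mem_takeWhile_imp hcmem) (by simp [hcw])
        have h3 : r.take F = (r.takeWhile (fun c => c != '\n')).take F := by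
          rw [h1, List.take_take, Nat.min_eq_left hFh]
        have hnone : (r.take F).reverse.findIdx? (fun c => c == '\n') = none := by
          rw [List.findIdx?_eq_none_iff]
          intro x hx
          exact hq x (List.mem_of_mem_take (h3 ▸ (List.mem_reverse.mp hx)))
        unfold pvStartOf
        rw [← hFdef, hnone]
      rw [hzero]
      simp

theorem line_strip_main (text : String) : line_strip text = line_strip_alt text := by
  set l := text.toList with hl
  cases hfi : l.findIdx? (fun c => !PySem.Chars.isspace c) with
  | none =>
    have hall : ∀ c ∈ l, PySem.Chars.isspace c = true := by
      intro c hc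
      have := List.findIdx?_eq_none_iff.mp hfi c hc
      simpa using this
    have hstr : PySem.Chars.rstrip l = [] := (pvRstrip_eq_nil_iff l).mpr hall
    simp only [line_strip, line_strip_alt, ← hl, hfi, hstr]
    simp
  | some f =>
    obtain ⟨hflt, hpf, -⟩ := List.findIdx?_eq_some_iff_getElem.mp hfi
    have hwf : PySem.Chars.isspace l[f] = false := by simpa using hpf
    have hex : ∃ c ∈ l, PySem.Chars.isspace c = false := ⟨l[f], List.getElem_mem hflt, hwf⟩
    have hfIdx : l.findIdx (fun c => !PySem.Chars.isspace c) = f :=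
      (List.findIdx?_eq_some_iff_findIdx_eq.mp hfi).2
    have hf_eq : (l.takeWhile PySem.Chars.isspace).length = f := by
      rw [← pvFindIdxNot_eq, hfIdx]
    set t := (l.reverse.takeWhile PySem.Chars.isspace).length with htdef
    have hk : l.reverse.findIdx (fun c => !PySem.Chars.isspace c) = t := pvFindIdxNot_eq l.reverse
    have htle : t ≤ l.length := by
      have := (List.takeWhile_prefix (l := l.reverse) PySem.Chars.isspace).length_le
      simpa using this
    have htlt : t < l.length := by
      rcases Nat.lt_or_ge t l.length with h | h
      · exact h
      · exfalso
        have hteq : t = l.reverse.length := by simp; omega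
        have : l.reverse.takeWhile PySem.Chars.isspace = l.reverse :=
          (List.takeWhile_prefix _).eq_of_length (by rw [← hteq])
        obtain ⟨c, hc, hcw⟩ := hex
        have : PySem.Chars.isspace c = true :=
          List.mem_takeWhile_imp (x := c) (by rw [this]; simpa using hc)
        simp [hcw] at this
    set m := l.length - t with hmdef
    set r := l.take m with hrdef
    have hr : PySem.Chars.rstrip l = r := by
      rw [PySem.Chars.rstrip, pvDropWhile_eq_drop, ← htdef, List.reverse_drop]
      simp [hrdef]
      omega
    have hrne : ¬ (r = []) := by
      rw [hrdef, List.take_eq_nil_iff]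
      push_neg
      constructor
      · omega
      · intro hnil; rw [hnil] at hflt; simp at hflt
    -- every index from m on is whitespace, so f < m
    have hflt_m : f < m := by
      by_contra hge
      push_neg at hge
      have hjlt : l.length - 1 - f < t := by omega
      have hrev : l.reverse[l.length - 1 - f]'(by simp; omega) = l[f] := by
        rw [List.getElem_reverse]
        congr 1
        omega
      have hmem : l[f] ∈ l.reverse.takeWhile PySem.Chars.isspace := by
        have hpe := (List.takeWhile_prefix (l := l.reverse) PySem.Chars.isspace).getElem
          (i := l.length - 1 - f) (by omega)
        have hval : (l.reverse.takeWhile PySem.Chars.isspace)[l.length - 1 - f]'(by omega) = l[f] :=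
          hpe.trans hrev
        rw [← hval]
        exact List.getElem_mem _
      have := List.mem_takeWhile_imp hmem
      simp [hwf] at this
    have h_take_eq : l.take f = r.take f := by
      rw [hrdef, List.take_take, Nat.min_eq_left (Nat.le_of_lt hflt_m)]
    have hfr : r.findIdx (fun c => !PySem.Chars.isspace c) = f := by
      rw [pvFindIdxNot_eq, hrdef, ← List.take_takeWhile, List.length_take, hf_eq,
        Nat.min_eq_right (Nat.le_of_lt hflt_m)]
    have hexr : ∃ c ∈ r, PySem.Chars.isspace c = false := by
      refine ⟨l[f], ?_, hwf⟩
      rw [hrdef]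
      have : (l.take m)[f]'(by simp; omega) = l[f] := List.getElem_take
      rw [← this]
      exact List.getElem_mem _
    have hstart_eq : (match (l.take f).reverse.findIdx? (fun c => c == '\n') with
        | none => 0 | some j => f - j) = pvStartOf r := by
      unfold pvStartOf
      rw [hfr, ← h_take_eq]
    have hstart_le : pvStartOf r ≤ f := by
      rw [← hstart_eq]
      cases (l.take f).reverse.findIdx? (fun c => c == '\n') <;> simp
    have hB : line_strip_alt text = String.mk (r.drop (pvStartOf r)) := by
      simp only [line_strip_alt, ← hl, hr, if_neg hrne]
      exact congrArg String.mk (by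
        rw [pvSplitOn_eq, PySem.Chars.join]
        exact pvCrux r.length r le_rfl hexr)
    have hA : line_strip text = String.mk (List.take (m - pvStartOf r) (List.drop (pvStartOf r) l)) := by
      simp only [line_strip, ← hl, hfi, hk, hstart_eq]
      rw [show l.length - 1 - t + 1 = m by omega]
      rw [PySem.List.slice_natCast]
    rw [hA, hB]
    have hfin : r.drop (pvStartOf r) = List.take (m - pvStartOf r) (List.drop (pvStartOf r) l) := by
      rw [hrdef, List.drop_take]
    rw [hfin]

-- ===== VERDICT (by name: the statement is the Claim_ definition above) =====
theorem line_strip_spec : Claim_equal_line_strip := by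
  intro text _
  show line_strip text = line_strip_alt text
  exact line_strip_main text
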